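-- pv_equiv track=rewrite | github.com/daniel-reich/ubiquitous-fiesta | AvP94XqJvPjoMk5PT_12.py | unique_styles
-- ===== SOURCE A (Python) =====
-- def unique_styles(albums):
--     result = 1
--     new_albums = []
--     for item in albums:
--         temp = item.split(',')
--         new_albums.extend(temp)
--     for i,item in enumerate(new_albums):
--         if i != 0 and item not in new_albums[:i]:
--             result += 1
--     return result
-- ===== SOURCE B (Python) =====
-- def unique_styles(albums):
--     flat = []
--     for a in albums:
--         flat.extend(a.split(','))
--     flat.sort()
--     if not flat:
--         return 0
--     count = 1
--     for x, y in zip(flat, flat[1:]):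
--         if x != y:
--             count += 1
--     return count
-- ===== Notes on version B (the rewrite author's own statement) =====
-- stated objective: alternative
-- what changed: Replaces the quadratic prefix-membership scan over the flattened list with a sort followed by a single adjacent-comparison pass counting distinct values.
-- intended difference: On the empty input list A returns 1 (its counter starts at 1 regardless of any item), while B returns 0, the correct count of distinct styles of zero albums. — e.g. on unique_styles([]): A returns 1, B returns 0
import Mathlib
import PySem

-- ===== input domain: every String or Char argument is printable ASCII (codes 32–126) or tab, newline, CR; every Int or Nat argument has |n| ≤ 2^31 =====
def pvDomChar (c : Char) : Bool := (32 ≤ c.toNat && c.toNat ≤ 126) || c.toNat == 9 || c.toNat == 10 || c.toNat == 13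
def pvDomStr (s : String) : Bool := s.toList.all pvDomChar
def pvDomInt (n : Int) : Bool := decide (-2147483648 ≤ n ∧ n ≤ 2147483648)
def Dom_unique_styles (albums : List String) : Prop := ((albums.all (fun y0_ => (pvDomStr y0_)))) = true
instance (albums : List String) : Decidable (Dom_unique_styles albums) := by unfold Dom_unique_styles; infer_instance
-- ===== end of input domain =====

-- B replaces A's quadratic prefix-membership scan by sort-then-adjacent-comparison; B returns 0 (not A's 1) on the empty list (see D_).

-- ===== PORT A =====
def unique_styles (albums : List String) : Int :=
  let new_albums := albums.foldl (fun acc item => acc ++ (PySem.Str.split? item ",").getD []) []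
  (PySem.List.enumerate new_albums).foldl
    (fun result p =>
      if p.1 ≠ 0 ∧ p.2 ∉ PySem.List.slice new_albums none (some p.1) then result + 1 else result)
    1

-- ===== PORT B =====
def unique_styles_alt (albums : List String) : Int :=
  let flat := albums.foldl (fun acc a => acc ++ (PySem.Str.split? a ",").getD []) []
  let s := PySem.List.sorted flat (fun x => x) false
  if flat = [] then 0
  else (s.zip s.tail).foldl (fun count p => if p.1 ≠ p.2 then count + 1 else count) 1

-- ===== PRECONDITION & SPEC =====
-- On the empty input list A returns 1 (its counter starts at 1 regardless of any item), while B
-- returns 0, the correct count of distinct styles of zero albums.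
def D_unique_styles (albums : List String) : Prop := albums = []
instance (albums : List String) : Decidable (D_unique_styles albums) := by unfold D_unique_styles; infer_instance
def Spec_unique_styles (albums : List String) (out : Int) : Prop := ¬ D_unique_styles albums → out = unique_styles_alt albums
instance (albums : List String) (out : Int) : Decidable (Spec_unique_styles albums out) := by unfold Spec_unique_styles; infer_instance
def pvDiffWitness_unique_styles : List String := []
def pvDiffWitnessOut_unique_styles : Int × Int := (1, 0)

-- ===== CLAIM (what is proved, stated in full; the proofs are below) =====
def Claim_unchanged_unique_styles : Prop := ∀ (albums : List String), Dom_unique_styles albums → Spec_unique_styles albums (unique_styles albums)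
def Claim_changed_unique_styles : Prop := Dom_unique_styles (pvDiffWitness_unique_styles) ∧ D_unique_styles (pvDiffWitness_unique_styles) ∧ unique_styles (pvDiffWitness_unique_styles) = pvDiffWitnessOut_unique_styles.1 ∧ unique_styles_alt (pvDiffWitness_unique_styles) = pvDiffWitnessOut_unique_styles.2 ∧ pvDiffWitnessOut_unique_styles.1 ≠ pvDiffWitnessOut_unique_styles.2
def Claim_exact_unique_styles : Prop := ∀ (albums : List String), Dom_unique_styles albums → D_unique_styles albums → unique_styles albums ≠ unique_styles_alt albums

-- ===== LEMMAS AND PROOFS =====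

-- str.split(sep) for a nonempty sep never returns the empty list
theorem pv_go_ne_nil (sep : List Char) : ∀ (fuel : Nat) (l cur : List Char) (acc : List (List Char)),
    PySem.Chars.splitOn.go sep fuel l cur acc ≠ [] := by
  intro fuel
  induction fuel with
  | zero => intro l cur acc; simp [PySem.Chars.splitOn.go]
  | succ n ih =>
    intro l cur acc
    cases l with
    | nil => simp [PySem.Chars.splitOn.go]
    | cons c rest =>
      rw [PySem.Chars.splitOn.go]
      split
      · exact ih _ _ _
      · exact ih _ _ _

theorem pv_split_ne_nil (a : String) : (PySem.Str.split? a ",").getD [] ≠ [] := by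
  simp [PySem.Str.split?, PySem.Chars.split?, PySem.Chars.splitOn]
  exact pv_go_ne_nil _ _ _ _ _

-- the flattened list is nonempty whenever the input list is
theorem pv_flat_ne_nil (albums : List String) (h : albums ≠ []) :
    albums.foldl (fun acc a => acc ++ (PySem.Str.split? a ",").getD []) [] ≠ [] := by
  rw [PySem.List.foldl_append_eq_flatMap]
  cases albums with
  | nil => exact absurd rfl h
  | cons a t =>
    simp only [List.nil_append, List.flatMap_cons]
    intro hc
    exact pv_split_ne_nil a (List.append_eq_nil_iff.mp hc).1

-- A's loop over any nonempty list computes the number of distinct elements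
theorem pv_loopA (l : List String) (h : l ≠ []) :
    (PySem.List.enumerate l).foldl
      (fun result p =>
        if p.1 ≠ 0 ∧ p.2 ∉ PySem.List.slice l none (some p.1) then result + 1 else result)
      1 = (l.toFinset.card : Int) := by
  induction l using List.reverseRecOn with
  | nil => exact absurd rfl h
  | append_singleton xs x ih =>
    rw [PySem.List.enumerate_append, List.foldl_append]
    have hsl : ∀ (r : Int), ∀ p ∈ PySem.List.enumerate xs (0 : Int),
        (if p.1 ≠ 0 ∧ p.2 ∉ PySem.List.slice (xs ++ [x]) none (some p.1) then r + 1 else r) =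
        (if p.1 ≠ 0 ∧ p.2 ∉ PySem.List.slice xs none (some p.1) then r + 1 else r) := by
      intro r p hp
      obtain ⟨k, hk, rfl⟩ := (PySem.List.mem_enumerate_iff _ _ _).mp hp
      have h0 : (0 : Int) ≤ 0 + (k : Int) := by omega
      rw [PySem.List.slice_to (xs ++ [x]) h0, PySem.List.slice_to xs h0]
      have : ((0 + (k : Int)).toNat) ≤ xs.length := by omega
      rw [List.take_append_of_le_length this]
    rw [PySem.List.foldl_congr_mem (PySem.List.enumerate xs) _ _ 1 hsl]
    cases hxs : xs with
    | nil =>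
      subst hxs
      simp [PySem.List.enumerate]
    | cons a t =>
      rw [← hxs]
      have hxs' : xs ≠ [] := by rw [hxs]; simp
      rw [ih hxs']
      have hlen : (0 : Int) + (xs.length : Int) ≠ 0 := by
        have : xs.length ≠ 0 := by rwa [Ne, List.length_eq_zero_iff]
        omega
      have hslice : PySem.List.slice (xs ++ [x]) none (some ((0:Int) + (xs.length : Int))) = xs := by
        rw [PySem.List.slice_to _ (by omega)]
        have : ((0 : Int) + (xs.length : Int)).toNat = xs.length := by omega
        rw [this, List.take_left]
      simp only [PySem.List.enumerate, List.foldl_cons, List.foldl_nil, hslice]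
      by_cases hmem : x ∈ xs
      · simp [hmem, List.toFinset_append,
          Finset.union_eq_left.mpr (by simp [List.mem_toFinset.mpr hmem] :
            ({x} : Finset String) ⊆ xs.toFinset)]
      · have : (xs ++ [x]).toFinset = insert x xs.toFinset := by
          simp [List.toFinset_append]
        rw [this, Finset.card_insert_of_notMem (by simpa using hmem)]
        rw [if_pos ⟨hlen, hmem⟩]
        push_cast
        ring

-- B's adjacent-comparison loop: shifting the accumulator
theorem pv_zshift (l : List (String × String)) : ∀ (c d : Int),
    l.foldl (fun count p => if p.1 ≠ p.2 then count + 1 else count) (c + d) =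
    l.foldl (fun count p => if p.1 ≠ p.2 then count + 1 else count) c + d := by
  induction l with
  | nil => intro c d; rfl
  | cons p t ih =>
    intro c d
    simp only [List.foldl_cons]
    by_cases hp : p.1 ≠ p.2
    · simp only [if_pos hp]
      have : c + d + 1 = (c + 1) + d := by ring
      rw [this, ih]
    · simp only [if_neg hp]
      exact ih c d

-- B's loop over a sorted nonempty list computes the number of distinct elements
theorem pv_loopB (s : List String) (hs : s.Pairwise (fun a b => a ≤ b)) (h : s ≠ []) :
    (s.zip s.tail).foldl (fun count p => if p.1 ≠ p.2 then count + 1 else count) 1 =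
      (s.toFinset.card : Int) := by
  induction s with
  | nil => exact absurd rfl h
  | cons x t ih =>
    cases t with
    | nil => simp
    | cons y u =>
      have hpt : (y :: u).Pairwise (fun a b => a ≤ b) := (List.pairwise_cons.mp hs).2
      have hxall : ∀ z ∈ y :: u, x ≤ z := (List.pairwise_cons.mp hs).1
      have ihv := ih hpt (by simp)
      simp only [List.tail_cons, List.zip_cons_cons, List.foldl_cons] at ihv ⊢
      by_cases hxy : x = y
      · subst hxy
        rw [if_neg (by simp)]
        have hfs : (x :: x :: u).toFinset = (x :: u).toFinset := by
          simp [List.toFinset_cons]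
        rw [hfs]
        exact ihv
      · rw [if_pos (by simpa using hxy)]
        have hnot : x ∉ y :: u := by
          intro hmem
          rcases List.mem_cons.mp hmem with h1 | h2
          · exact hxy h1
          · have h3 : y ≤ x := (List.pairwise_cons.mp hpt).1 x h2
            exact hxy (le_antisymm (hxall y (by simp)) h3)
        rw [pv_zshift _ 1 1, ihv]
        have hfs : (x :: y :: u).toFinset = insert x (y :: u).toFinset := by
          simp [List.toFinset_cons]
        rw [hfs, Finset.card_insert_of_notMem (by simpa using hnot)]
        push_cast
        ring

-- ===== VERDICT (by name: the statement is the Claim_ definition above) =====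
theorem unique_styles_spec : Claim_unchanged_unique_styles := by
  intro albums _ hD
  have hne : albums ≠ [] := hD
  show unique_styles albums = unique_styles_alt albums
  unfold unique_styles unique_styles_alt
  set F := albums.foldl (fun acc a => acc ++ (PySem.Str.split? a ",").getD []) [] with hF
  have hFne : F ≠ [] := pv_flat_ne_nil albums hne
  rw [if_neg hFne]
  have hA := pv_loopA F hFne
  have hsp : (PySem.List.sorted F (fun x => x) false).Pairwise (fun a b => a ≤ b) :=
    PySem.List.sorted_pairwise F (fun x => x)
  have hsne : PySem.List.sorted F (fun x => x) false ≠ [] := by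
    rw [Ne, PySem.List.sorted_eq_nil_iff]
    exact hFne
  have hB := pv_loopB (PySem.List.sorted F (fun x => x) false) hsp hsne
  have hperm : (PySem.List.sorted F (fun x => x) false).Perm F := PySem.List.sorted_perm F _ _
  rw [hA, hB, List.toFinset_eq_of_perm _ _ hperm]

theorem unique_styles_changed : Claim_changed_unique_styles := by
  unfold Claim_changed_unique_styles; decide

theorem unique_styles_tight : Claim_exact_unique_styles := by
  intro albums _ hD
  subst hD
  decide
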